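/- GENERATED by mk_final_copies.py from the proof of the farm's unit `imdct_step3_iter0_loop.3` (farm:imdct_step3_iter0_loop.3.2: Proof.lean) as the
   re-elaboration sweep compiled it — do not edit. -/
import Asan.CheckWalk
import Vorbis.Spec.Units.imdct_step3_iter0_loop_3
open X86 X86.User Asan Vorbis Vorbis.Spec

set_option maxRecDepth 4000
-- the walks and the exit are one declaration: `maxHeartbeats` counts them together (4M ends inside the exit's `u_same`)
set_option maxHeartbeats 16000000

namespace Vorbis.Spec.imdct_step3_iter0_loop_3

/-- `sub r14d, 1` on a counter `1 ≤ n < 2 ^ 32` that the register holds zero-extended: the new value is `n − 1` (and the upper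
half of the register is 0 again). -/
theorem dec32 (x : Word) (n : Nat) (hx : x.toNat = n) (h1 : 1 ≤ n) (h32 : n < 2 ^ 32) :
    (Word.ofBV (Word.part .w32 x - 1#32)).toNat = n - 1 := by
  have e1 : (1#32).toNat = 1 := rfl
  rw [toNat_ofBV32, BitVec.toNat_sub, toNat_part32, hx, e1]
  omega

end Vorbis.Spec.imdct_step3_iter0_loop_3

/-- Segment 3 of `imdct_step3_iter0_loop` (`cut2` = 0x1051b0 … 0x10536a, exit `loop1` = 0x10536e: the second half of the loop body,
quarters 2 and 3, stb_vorbis_fixed.c:2460-2477; 90 instructions, 12 `__asan_load4_noabort` checks, no branch): from the assertion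
`AtMid` (the loop invariant and `t < m` at `cut2`) to the assertion `AtHead` with `t + 1` (the loop invariant at the head).

* BEFORE THE WALK the invariant's pointer sums (`hee0`, `hee2`, `hA`) and `PairDown` are turned into plain bounds (`hb12`, `hbbx`,
  `hbbp`): the eight floats `r12[-7 .. 0]` and `rbx[-7 .. 0]` lie in the live `e[0 .. len)`, the floats `rbp[0 .. 25]` in the live `A`.
* THE WALK IS CUT AT THE RETURN OF EVERY CHECK (`ret13` … `ret24`): a check's contract introduces `w_zmm` (the vector registers are
  kept), and from then on every SSE instruction doubles that term; after each check `w_zmm` is cleared (no assertion speaks of a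
  vector register).
* EVERY CHECK GOAL is closed at object level: the address lies in the live range (`LiveBytes.accSmall`), and no store so far went
  to the shadow. That fact is carried along as `hun<k>` over the literal memory term of the stop, so that `v_untouched` only
  looks at the stores made since the last stop (or the one before: a return address pushed over the previous one replaces it).
* THE EXIT: `hsv` (the segment's own footprint, relative to `v`: `u_same`, once) gives the frame slots (`hstk`) and, through the
  carried `same`, the function's footprint; the four moving registers are read off `w_rbp`, `w_r12`, `w_rbx`, `w_r14`
  (`rbp + 128`, `r12 − 32`, `rbx − 32`, `r14d − 1`) and give the invariant with `t + 1`. -/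
theorem Vorbis.Spec.Worked.imdct_step3_iter0_loop_3_ok : Vorbis.Spec.imdct_step3_iter0_loop_3.Statement := by
  intro Lay hLay μ hμ u₀ hcode hload4 others frames len i0 koff ue ret t v hv
  obtain ⟨hrip, hloop, hlt⟩ := hv
  obtain ⟨hbody, hle, hcnt, hee0, hee2, hA⟩ := hloop
  obtain ⟨he, hpre, hcodeok, habi, hframe, hsame, hshadow⟩ := hbody
  obtain ⟨hrsp, sret, s15, s14, s13, s12, sbp, sbx⟩ := hframe
  -- the entry state's facts (`he_room`, `he_top`, … are about `ue`)
  have he0 := he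
  have hpre0 := hpre
  v_entry he
  obtain ⟨hsh, hn31, hi0, hneg, hpair, hlive, hAlive⟩ := hpre
  -- the present state's facts under the walker's names: DF / MXCSR / SseOK, the code span, the shadow untouched so far
  have hdf := habi.1
  have hmx := habi.2
  have hsse : SseOK v := sseOK_of_abiInv habi
  have w_eq : Mem.EqOn Vorbis.L.textLo Vorbis.L.textHi u₀.mem v.mem := hcodeok
  have hsp := hsh.rsp
  have hun0 : Mem.EqOn 0xC00000 0xE00000 ue.mem v.mem := hshadow
  -- where the two runs and the twiddle factors are: plain bounds for `u_omega`
  have hhi := hpair.hi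
  have hlo := hpair.lo
  obtain ⟨hwe1, hwe2, _⟩ := hlive.where_ hsh.inv hsh.offText (by omega) (by omega)
  have hAl := hAlive (by omega)
  obtain ⟨hwA1, hwA2, _⟩ := hAl.where_ hsh.inv hsh.offText (by omega) (by omega)
  have hb12 : (ue.reg .rsi).toNat + 28 ≤ (v.reg .r12).toNat ∧ (v.reg .r12).toNat + 4 ≤ (ue.reg .rsi).toNat + 4 * len := by omega
  have hbbx : (ue.reg .rsi).toNat + 28 ≤ (v.reg .rbx).toNat ∧ (v.reg .rbx).toNat + 4 ≤ (ue.reg .rsi).toNat + 4 * len := by omega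
  have hbbp : (ue.reg .r8).toNat ≤ (v.reg .rbp).toNat ∧
      (v.reg .rbp).toNat + 104 ≤ (ue.reg .r8).toNat + 4 * (32 * quarter ue - 6) := by omega
  -- 0x1051b0 = cut2 (stb_vorbis_fixed.c:2460): the walk, cut at the return of every check
  -- … 0x1051b5: the check of `ee0[-4]` (stb_vorbis_fixed.c:2460), on to its return `ret13`
  u_walk hcode [hμ.vendor] until [Vorbis.L.imdct_step3_iter0_loop.ret13] span [Vorbis.L.textLo, Vorbis.L.textHi] side (v_side)
  case check_1051b5 =>
    have hun : ShadowUntouched ue.mem s_1051b5.mem := by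
      v_untouched
    exact hlive.accSmall hsh.inv hun _ 4 (by decide) (by u_omega) (by u_omega)
  have hun1 : Mem.EqOn 0xC00000 0xE00000 ue.mem s_1051b5r.mem := by
    rw [w_mem]
    u_eqon
  rw [w_mem] at hun1
  try clear w_zmm
  -- … 0x1051c3: the check of `ee2[-4]` (stb_vorbis_fixed.c:2460), on to its return `ret14`
  u_walk hcode [hμ.vendor] until [Vorbis.L.imdct_step3_iter0_loop.ret14] span [Vorbis.L.textLo, Vorbis.L.textHi] side (v_side)
  case check_1051c3 =>
    have hun : ShadowUntouched ue.mem s_1051c3.mem := by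
      v_untouched
    exact hlive.accSmall hsh.inv hun _ 4 (by decide) (by u_omega) (by u_omega)
  have hun2 : Mem.EqOn 0xC00000 0xE00000 ue.mem s_1051c3r.mem := by
    rw [w_mem]
    u_eqon
  rw [w_mem] at hun2
  try clear w_zmm
  -- … 0x1051e7: the check of `ee0[-5]` (stb_vorbis_fixed.c:2461), on to its return `ret15`
  u_walk hcode [hμ.vendor] until [Vorbis.L.imdct_step3_iter0_loop.ret15] span [Vorbis.L.textLo, Vorbis.L.textHi] side (v_side)
  case check_1051e7 =>
    have hun : ShadowUntouched ue.mem s_1051e7.mem := by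
      v_untouched
    exact hlive.accSmall hsh.inv hun _ 4 (by decide) (by u_omega) (by u_omega)
  have hun3 : Mem.EqOn 0xC00000 0xE00000 ue.mem s_1051e7r.mem := by
    rw [w_mem]
    u_eqon
  rw [w_mem] at hun3
  try clear w_zmm
  -- … 0x1051f5: the check of `ee2[-5]` (stb_vorbis_fixed.c:2461), on to its return `ret16`
  u_walk hcode [hμ.vendor] until [Vorbis.L.imdct_step3_iter0_loop.ret16] span [Vorbis.L.textLo, Vorbis.L.textHi] side (v_side)
  case check_1051f5 =>
    have hun : ShadowUntouched ue.mem s_1051f5.mem := by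
      v_untouched
    exact hlive.accSmall hsh.inv hun _ 4 (by decide) (by u_omega) (by u_omega)
  have hun4 : Mem.EqOn 0xC00000 0xE00000 ue.mem s_1051f5r.mem := by
    rw [w_mem]
    u_eqon
  rw [w_mem] at hun4
  try clear w_zmm
  -- … 0x105231: the check of `A[16]` (stb_vorbis_fixed.c:2464), on to its return `ret17`
  u_walk hcode [hμ.vendor] until [Vorbis.L.imdct_step3_iter0_loop.ret17] span [Vorbis.L.textLo, Vorbis.L.textHi] side (v_side)
  case check_105231 =>
    have hun : ShadowUntouched ue.mem s_105231.mem := by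
      v_untouched
    exact hAl.accSmall hsh.inv hun _ 4 (by decide) (by u_omega) (by u_omega)
  have hun5 : Mem.EqOn 0xC00000 0xE00000 ue.mem s_105231r.mem := by
    rw [w_mem]
    u_eqon
  rw [w_mem] at hun5
  try clear w_zmm
  -- … 0x10524a: the check of `A[17]` (stb_vorbis_fixed.c:2464), on to its return `ret18`
  u_walk hcode [hμ.vendor] until [Vorbis.L.imdct_step3_iter0_loop.ret18] span [Vorbis.L.textLo, Vorbis.L.textHi] side (v_side)
  case check_10524a =>
    have hun : ShadowUntouched ue.mem s_10524a.mem := by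
      v_untouched
    exact hAl.accSmall hsh.inv hun _ 4 (by decide) (by u_omega) (by u_omega)
  have hun6 : Mem.EqOn 0xC00000 0xE00000 ue.mem s_10524ar.mem := by
    rw [w_mem]
    u_eqon
  rw [w_mem] at hun6
  try clear w_zmm
  -- … 0x10528c: the check of `ee0[-6]` (stb_vorbis_fixed.c:2468), on to its return `ret19`
  u_walk hcode [hμ.vendor] until [Vorbis.L.imdct_step3_iter0_loop.ret19] span [Vorbis.L.textLo, Vorbis.L.textHi] side (v_side)
  case check_10528c =>
    have hun : ShadowUntouched ue.mem s_10528c.mem := by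
      v_untouched
    exact hlive.accSmall hsh.inv hun _ 4 (by decide) (by u_omega) (by u_omega)
  have hun7 : Mem.EqOn 0xC00000 0xE00000 ue.mem s_10528cr.mem := by
    rw [w_mem]
    u_eqon
  rw [w_mem] at hun7
  try clear w_zmm
  -- … 0x10529a: the check of `ee2[-6]` (stb_vorbis_fixed.c:2468), on to its return `ret20`
  u_walk hcode [hμ.vendor] until [Vorbis.L.imdct_step3_iter0_loop.ret20] span [Vorbis.L.textLo, Vorbis.L.textHi] side (v_side)
  case check_10529a =>
    have hun : ShadowUntouched ue.mem s_10529a.mem := by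
      v_untouched
    exact hlive.accSmall hsh.inv hun _ 4 (by decide) (by u_omega) (by u_omega)
  have hun8 : Mem.EqOn 0xC00000 0xE00000 ue.mem s_10529ar.mem := by
    rw [w_mem]
    u_eqon
  rw [w_mem] at hun8
  try clear w_zmm
  -- … 0x1052be: the check of `ee0[-7]` (stb_vorbis_fixed.c:2469), on to its return `ret21`
  u_walk hcode [hμ.vendor] until [Vorbis.L.imdct_step3_iter0_loop.ret21] span [Vorbis.L.textLo, Vorbis.L.textHi] side (v_side)
  case check_1052be =>
    have hun : ShadowUntouched ue.mem s_1052be.mem := by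
      v_untouched
    exact hlive.accSmall hsh.inv hun _ 4 (by decide) (by u_omega) (by u_omega)
  have hun9 : Mem.EqOn 0xC00000 0xE00000 ue.mem s_1052ber.mem := by
    rw [w_mem]
    u_eqon
  rw [w_mem] at hun9
  try clear w_zmm
  -- … 0x1052cc: the check of `ee2[-7]` (stb_vorbis_fixed.c:2469), on to its return `ret22`
  u_walk hcode [hμ.vendor] until [Vorbis.L.imdct_step3_iter0_loop.ret22] span [Vorbis.L.textLo, Vorbis.L.textHi] side (v_side)
  case check_1052cc =>
    have hun : ShadowUntouched ue.mem s_1052cc.mem := by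
      v_untouched
    exact hlive.accSmall hsh.inv hun _ 4 (by decide) (by u_omega) (by u_omega)
  have hun10 : Mem.EqOn 0xC00000 0xE00000 ue.mem s_1052ccr.mem := by
    rw [w_mem]
    u_eqon
  rw [w_mem] at hun10
  try clear w_zmm
  -- … 0x105308: the check of `A[24]` (stb_vorbis_fixed.c:2472), on to its return `ret23`
  u_walk hcode [hμ.vendor] until [Vorbis.L.imdct_step3_iter0_loop.ret23] span [Vorbis.L.textLo, Vorbis.L.textHi] side (v_side)
  case check_105308 =>
    have hun : ShadowUntouched ue.mem s_105308.mem := by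
      v_untouched
    exact hAl.accSmall hsh.inv hun _ 4 (by decide) (by u_omega) (by u_omega)
  have hun11 : Mem.EqOn 0xC00000 0xE00000 ue.mem s_105308r.mem := by
    rw [w_mem]
    u_eqon
  rw [w_mem] at hun11
  try clear w_zmm
  -- … 0x105321: the check of `A[25]` (stb_vorbis_fixed.c:2472), on to its return `ret24`
  u_walk hcode [hμ.vendor] until [Vorbis.L.imdct_step3_iter0_loop.ret24] span [Vorbis.L.textLo, Vorbis.L.textHi] side (v_side)
  case check_105321 =>
    have hun : ShadowUntouched ue.mem s_105321.mem := by
      v_untouched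
    exact hAl.accSmall hsh.inv hun _ 4 (by decide) (by u_omega) (by u_omega)
  have hun12 : Mem.EqOn 0xC00000 0xE00000 ue.mem s_105321r.mem := by
    rw [w_mem]
    u_eqon
  rw [w_mem] at hun12
  try clear w_zmm
  -- … the rest of quarter 3, the four pointer / counter updates, on to the loop head
  u_walk hcode [hμ.vendor] until [Vorbis.L.imdct_step3_iter0_loop.loop1] span [Vorbis.L.textLo, Vorbis.L.textHi] side (v_side)
  -- 0x10536e = loop1: the exit assertion `AtHead` with `t + 1`
  have hfin : ShadowUntouched ue.mem s_10536a.mem := by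
    v_untouched
  -- what the segment wrote, relative to its own entry state `v`: the scratch floats and the return addresses of the checks
  -- in the frame, four floats of each run (`r12[-7 .. -4]`, `rbx[-7 .. -4]`)
  have hsv : Mem.SameExcept [⟨(ue.reg .rsp).toNat - 96, (ue.reg .rsp).toNat - 56⟩,
      ⟨(v.reg .r12).toNat - 28, (v.reg .r12).toNat - 12⟩,
      ⟨(v.reg .rbx).toNat - 28, (v.reg .rbx).toNat - 12⟩] v.mem s_10536a.mem := by
    u_same
  -- the save slots and the return address are off these windows
  obtain ⟨_, _, hwe3⟩ := hlive.where_ hsh.inv hsh.offText (by omega) (by omega)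
  have hstk : Mem.EqOn ((ue.reg .rsp).toNat - 56) ((ue.reg .rsp).toNat + 8) v.mem s_10536a.mem := by
    refine hsv.eqOn _ _ ?_
    intro w hw
    simp only [List.mem_cons, List.not_mem_nil, or_false] at hw
    rcases hw with rfl | rfl | rfl
    · simp only
      omega
    · simp only
      omega
    · simp only
      omega
  simp only [X86.User.Spec.footprint, imdct_step3_iter0_loop.spec_frame, imdct_step3_iter0_loop.spec_writes] at hsame
  -- the counter is a 32-bit number
  have hq := quarter_def ue
  refine ReachVia.done ⟨w_rip, ⟨he0, hpre0, w_eq, ?abi, ⟨w_rsp, ?_, ?_, ?_, ?_, ?_, ?_, ?_⟩, ?same, hfin⟩, ?le, ?cnt, ?ee0, ?ee2, ?A⟩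
  case abi => v_inv
  case same =>
    simp only [X86.User.Spec.footprint, imdct_step3_iter0_loop.spec_frame, imdct_step3_iter0_loop.spec_writes]
    refine hsame.step_same' hsv ?_
    intro w hw
    simp only [List.mem_cons, List.not_mem_nil, or_false] at hw
    rcases hw with rfl | rfl | rfl
    · right
      simp only [X86.User.inSpans_cons, X86.User.inSpans_nil, or_false]
      omega
    · right
      simp only [X86.User.inSpans_cons, X86.User.inSpans_nil, or_false]
      omega
    · right
      simp only [X86.User.inSpans_cons, X86.User.inSpans_nil, or_false]
      omega
  case le => omega
  case cnt =>
    rw [w_r14, Vorbis.Spec.imdct_step3_iter0_loop_3.dec32 _ _ hcnt (by omega) (by omega)]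
    omega
  case ee0 =>
    rw [w_r12]
    u_omega
  case ee2 =>
    rw [w_rbx]
    u_omega
  case A =>
    rw [w_rbp]
    u_omega
  · exact Mem.ofNat_readLE_frame sret (hstk.mono (by u_omega) (by u_omega)) (by u_omega)
  · exact Mem.ofNat_readLE_frame s15 (hstk.mono (by u_omega) (by u_omega)) (by u_omega)
  · exact Mem.ofNat_readLE_frame s14 (hstk.mono (by u_omega) (by u_omega)) (by u_omega)
  · exact Mem.ofNat_readLE_frame s13 (hstk.mono (by u_omega) (by u_omega)) (by u_omega)
  · exact Mem.ofNat_readLE_frame s12 (hstk.mono (by u_omega) (by u_omega)) (by u_omega)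
  · exact Mem.ofNat_readLE_frame sbp (hstk.mono (by u_omega) (by u_omega)) (by u_omega)
  · exact Mem.ofNat_readLE_frame sbx (hstk.mono (by u_omega) (by u_omega)) (by u_omega)
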